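-- pv_equiv track=rewrite | github.com/conradstorz/Morse-Code | Morse_Code.py | capture_next_transistion
-- ===== SOURCE A (Python) =====
-- def capture_next_transistion(morse):
--     """ pull characters from beginning of string until phase change.
--         for example: from silence to sound, or sound to silence. """
--     output = ''
--     SILENCE = False
--     CODE = True
--     morse_list = list(morse)
--
--     mode = SILENCE
--     while len(morse_list) > 0:
--         char = morse_list.pop(0)
--
--         if char == ' ':
--             transmission = SILENCE
--         else:
--             transmission = CODE
--
--         if output == '':
--             output += char
--             mode = transmission
--         else:
--             if mode == transmission:
--                 output += char
--             else:
--                 return output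
--     return output
-- ===== SOURCE B (Python) =====
-- from itertools import groupby
--
-- def capture_next_transistion(morse):
--     for _, group in groupby(morse, key=lambda c: c == ' '):
--         return ''.join(group)
--     return ''
-- ===== Notes on version B (the rewrite author's own statement) =====
-- stated objective: faster
-- what changed: Replaces A's stateful character-by-character loop (mode flag, pop(0), output accumulator) with itertools.groupby partitioning the input into maximal same-mode runs and joining the first run.
import Mathlib
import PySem

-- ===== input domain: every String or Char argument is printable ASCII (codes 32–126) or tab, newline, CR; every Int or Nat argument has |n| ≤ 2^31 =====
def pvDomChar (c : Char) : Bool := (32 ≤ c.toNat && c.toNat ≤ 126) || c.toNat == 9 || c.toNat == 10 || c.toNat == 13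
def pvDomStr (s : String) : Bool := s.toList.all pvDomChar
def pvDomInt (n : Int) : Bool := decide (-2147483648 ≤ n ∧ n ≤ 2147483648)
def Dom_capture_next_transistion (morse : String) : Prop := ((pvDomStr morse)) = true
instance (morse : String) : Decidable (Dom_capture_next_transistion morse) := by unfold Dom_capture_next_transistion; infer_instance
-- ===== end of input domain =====

-- B replaces A's stateful pop-loop with a groupby-style "take the first maximal same-mode run" (idiomatic).


-- ===== PORT A =====
-- literal port of A's while loop: pop the head, compute transmission, branch on output == '' / mode == transmission
def captureLoopA : List Char → List Char → Bool → List Char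
  | [], output, _ => output
  | c :: rest, output, mode =>
    let transmission : Bool := decide (c ≠ ' ')
    if output = [] then captureLoopA rest (output ++ [c]) transmission
    else if mode = transmission then captureLoopA rest (output ++ [c]) mode
    else output

def capture_next_transistion (morse : String) : String :=
  String.mk (captureLoopA morse.toList [] false)

-- ===== PORT B =====
-- port of B: the first groupby group (key c == ' ') is the maximal leading run with the first char's key
def capture_next_transistion_alt (morse : String) : String :=
  match morse.toList with
  | [] => ""
  | c :: rest => String.mk (c :: rest.takeWhile (fun x => (x == ' ') == (c == ' ')))

-- ===== PRECONDITION & SPEC =====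
def Spec_capture_next_transistion (morse : String) (out : String) : Prop := out = capture_next_transistion_alt morse
instance (morse : String) (out : String) : Decidable (Spec_capture_next_transistion morse out) := by unfold Spec_capture_next_transistion; infer_instance

-- ===== CLAIM (what is proved, stated in full; the proofs are below) =====
def Claim_equal_capture_next_transistion : Prop := ∀ (morse : String), Dom_capture_next_transistion morse → Spec_capture_next_transistion morse (capture_next_transistion morse)

-- ===== LEMMAS AND PROOFS =====

-- once output is nonempty, A's loop appends exactly the leading run of chars whose mode matches `mode`
theorem captureLoopA_ne (l : List Char) : ∀ (out : List Char) (mode : Bool), out ≠ [] →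
    captureLoopA l out mode = out ++ l.takeWhile (fun x => mode == decide (x ≠ ' ')) := by
  induction l with
  | nil => intro out mode _; simp [captureLoopA]
  | cons c rest ih =>
    intro out mode hne
    by_cases hm : mode = decide (c ≠ ' ')
    · rw [show captureLoopA (c :: rest) out mode = captureLoopA rest (out ++ [c]) mode by
        simp [captureLoopA, hne, hm]]
      rw [ih (out ++ [c]) mode (by simp)]
      simp [List.takeWhile, hm.symm]
    · have hm' : ¬ mode = !decide (c = ' ') := by simpa [decide_not] using hm
      have hb : (mode == !decide (c = ' ')) = false := by simp [hm']
      simp [captureLoopA, hne, hm', List.takeWhile, hb]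

theorem key_eq (c x : Char) :
    (decide (c ≠ ' ') == decide (x ≠ ' ')) = ((x == ' ') == (c == ' ')) := by
  by_cases hc : c = ' ' <;> by_cases hx : x = ' ' <;> simp [hc, hx]

-- ===== VERDICT (by name: the statement is the Claim_ definition above) =====
theorem capture_next_transistion_spec : Claim_equal_capture_next_transistion := by
  intro morse _
  unfold Spec_capture_next_transistion capture_next_transistion capture_next_transistion_alt
  cases h : morse.toList with
  | nil => rfl
  | cons c rest =>
    rw [show captureLoopA (c :: rest) [] false = captureLoopA rest [c] (decide (c ≠ ' ')) by
      simp [captureLoopA]]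
    rw [captureLoopA_ne rest [c] (decide (c ≠ ' ')) (by simp)]
    have hp : (fun x => decide (c ≠ ' ') == decide (x ≠ ' '))
        = (fun x : Char => (x == ' ') == (c == ' ')) := funext (key_eq c)
    rw [hp]
    rfl
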